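-- pv_equiv track=rewrite | github.com/131250208/InfExtraction | InfExtraction/components/preprocess.py | _get_char2tok_span
-- ===== SOURCE A (Python) =====
-- def _get_char2tok_span(tok2char_span):
--     '''
--
--     get a map from character level index to token level span
--     e.g. "She is singing" -> [
--                              [0, 1], [0, 1], [0, 1], # She
--                              [-1, -1] # whitespace
--                              [1, 2], [1, 2], # is
--                              [-1, -1] # whitespace
--                              [2, 3], [2, 3], [2, 3], [2, 3], [2, 3], [2, 3], [2, 3] # singing
--                              ]
--
--      tok2char_span： a map from token index to character level span
--     '''
--
--     # get the number of characters
--     char_num = None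
--     for tok_ind in range(len(tok2char_span) - 1, -1, -1):
--         if tok2char_span[tok_ind][1] != 0:
--             char_num = tok2char_span[tok_ind][1]
--             break
--
--     # build a map: char index to token level span
--     char2tok_span = [[-1, -1] for _ in range(char_num)]  # 除了空格，其他字符均有对应token
--     for tok_ind, char_sp in enumerate(tok2char_span):
--         for char_ind in range(char_sp[0], char_sp[1]):
--             tok_sp = char2tok_span[char_ind]
--             # 因为在bert中，char to tok 也可能出现1对多的情况，比如韩文。
--             # 所以char_span的pos1以第一个tok_ind为准，pos2以最后一个tok_ind为准
--             if tok_sp[0] == -1: # 第一次赋值以后不再修改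
--                 tok_sp[0] = tok_ind
--             tok_sp[1] = tok_ind + 1 # 一直修改
--     return char2tok_span
-- ===== SOURCE B (Python) =====
-- def _get_char2tok_span(tok2char_span):
--     # Same backward scan for char_num as the original.
--     char_num = None
--     for tok_ind in range(len(tok2char_span) - 1, -1, -1):
--         if tok2char_span[tok_ind][1] != 0:
--             char_num = tok2char_span[tok_ind][1]
--             break
--
--     # Transposed traversal: for each character position, collect the token
--     # indices whose span covers it and reduce them to first / last + 1.
--     char2tok_span = []
--     for char_ind in range(char_num):
--         toks = [tok_ind for tok_ind, sp in enumerate(tok2char_span)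
--                 if sp[0] <= char_ind < sp[1]]
--         if toks:
--             char2tok_span.append([toks[0], toks[-1] + 1])
--         else:
--             char2tok_span.append([-1, -1])
--     return char2tok_span
-- ===== Notes on version B (the rewrite author's own statement) =====
-- stated objective: alternative
-- what changed: Replaces A's per-token fill of a mutable result array (assign-first-once / overwrite-last trick) by a transposed per-character pass that collects the covering token indices and reduces them to [first, last+1].
-- outside the precondition, e.g. on _get_char2tok_span([[-1, 0], [0, 1]]): A returns [[0, 2]], B returns [[1, 2]]
import Mathlib
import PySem

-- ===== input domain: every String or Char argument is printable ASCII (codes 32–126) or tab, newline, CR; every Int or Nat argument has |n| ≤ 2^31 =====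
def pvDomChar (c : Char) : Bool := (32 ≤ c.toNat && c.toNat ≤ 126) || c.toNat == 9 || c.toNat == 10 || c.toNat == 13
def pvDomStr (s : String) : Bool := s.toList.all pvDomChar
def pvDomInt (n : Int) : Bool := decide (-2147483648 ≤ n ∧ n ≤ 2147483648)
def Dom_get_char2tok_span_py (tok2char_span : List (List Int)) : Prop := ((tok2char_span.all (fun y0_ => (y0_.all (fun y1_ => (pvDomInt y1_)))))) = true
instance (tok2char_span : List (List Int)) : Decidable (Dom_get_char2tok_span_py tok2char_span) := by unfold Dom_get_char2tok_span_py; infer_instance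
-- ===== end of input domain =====

-- B replaces A's per-token fill of a mutable array by a transposed per-character
-- collect-then-reduce pass (alternative decomposition, not claimed faster).

-- ===== PORT A =====
-- shared with B (and with Pre_): the backward scan for char_num, i.e. the end of the
-- last span whose second component is nonzero (both Pythons contain this scan verbatim)
def pvLastNZ (l : List (List Int)) : Option Int :=
  (l.reverse.find? (fun sp => PySem.List.pyGetD sp 1 0 != 0)).map (fun sp => PySem.List.pyGetD sp 1 0)

-- one iteration of A's inner loop: read the cell, assign pos 0 once, overwrite pos 1
def pvAStep (arr : List (List Int)) (ti : Int) (ci : Int) : List (List Int) :=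
  let cell := PySem.List.pyGetD arr ci []
  let cell := if PySem.List.pyGetD cell 0 0 = -1 then PySem.List.pySetD cell 0 ti else cell
  let cell := PySem.List.pySetD cell 1 (ti + 1)
  PySem.List.pySetD arr ci cell

def get_char2tok_span_py (tok2char_span : List (List Int)) : List (List Int) :=
  match pvLastNZ tok2char_span with
  | none => []   -- Python: char_num is None, range(None) raises TypeError; excluded by Pre_
  | some c =>
    let init := (PySem.List.pyRange 0 c 1).map (fun _ => ([-1, -1] : List Int))
    (PySem.List.enumerate tok2char_span).foldl
      (fun arr p =>
        (PySem.List.pyRange (PySem.List.pyGetD p.2 0 0) (PySem.List.pyGetD p.2 1 0) 1).foldl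
          (fun arr2 ci => pvAStep arr2 p.1 ci) arr)
      init

-- ===== PORT B =====
-- B: the token indices covering character ci, in token order (list comprehension)
def pvCovToks (l : List (List Int)) (ci : Int) : List Int :=
  (PySem.List.enumerate l).foldl
    (fun acc p =>
      if PySem.List.pyGetD p.2 0 0 ≤ ci ∧ ci < PySem.List.pyGetD p.2 1 0
      then acc ++ [p.1] else acc) []

-- B: reduce the covering token indices to [first, last + 1] ([-1,-1] if none)
def pvCell (toks : List Int) : List Int :=
  if toks = [] then [-1, -1]
  else [PySem.List.pyGetD toks 0 0, PySem.List.pyGetD toks (-1) 0 + 1]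

def get_char2tok_span_py_alt (tok2char_span : List (List Int)) : List (List Int) :=
  match pvLastNZ tok2char_span with
  | none => []
  | some c =>
    (PySem.List.pyRange 0 c 1).foldl
      (fun acc ci => acc ++ [pvCell (pvCovToks tok2char_span ci)]) []

-- ===== PRECONDITION & SPEC =====
-- Pre_ excludes the inputs on which A raises (no span with nonzero end, a span shorter
-- than 2, or a nonempty span reaching past char_num) and the nonempty spans with a
-- negative start, on which A's negative-index wraparound result is an implementation accident.
def Pre_get_char2tok_span_py (tok2char_span : List (List Int)) : Prop :=
  (∀ sp ∈ tok2char_span, 2 ≤ sp.length) ∧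
  (pvLastNZ tok2char_span).isSome = true ∧
  ∀ sp ∈ tok2char_span,
    PySem.List.pyGetD sp 0 0 < PySem.List.pyGetD sp 1 0 →
      0 ≤ PySem.List.pyGetD sp 0 0 ∧
      PySem.List.pyGetD sp 1 0 ≤ (pvLastNZ tok2char_span).getD 0
instance (tok2char_span : List (List Int)) : Decidable (Pre_get_char2tok_span_py tok2char_span) := by
  unfold Pre_get_char2tok_span_py; infer_instance

def pvWitness_get_char2tok_span_py : List (List Int) := [[0, 1], [1, 3]]

def Spec_get_char2tok_span_py (tok2char_span : List (List Int)) (out : List (List Int)) : Prop := out = get_char2tok_span_py_alt tok2char_span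
instance (tok2char_span : List (List Int)) (out : List (List Int)) : Decidable (Spec_get_char2tok_span_py tok2char_span out) := by unfold Spec_get_char2tok_span_py; infer_instance

-- ===== CLAIM (what is proved, stated in full; the proofs are below) =====
def Claim_equal_get_char2tok_span_py : Prop := ∀ (tok2char_span : List (List Int)), Dom_get_char2tok_span_py tok2char_span → Pre_get_char2tok_span_py tok2char_span → Spec_get_char2tok_span_py tok2char_span (get_char2tok_span_py tok2char_span)

-- ===== LEMMAS AND PROOFS =====

-- the covering-token list of a suffix of the enumerated token list, closed filter form
def pvCov (ts : List (Int × List Int)) (j : Int) : List Int :=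
  (ts.filter (fun p => decide (PySem.List.pyGetD p.2 0 0 ≤ j ∧ j < PySem.List.pyGetD p.2 1 0))).map
    (fun p => p.1)

theorem pvCovToks_eq_pvCov (l : List (List Int)) (j : Int) :
    pvCovToks l j = pvCov (PySem.List.enumerate l) j := by
  unfold pvCovToks pvCov
  rw [PySem.List.foldl_append_ite]
  simp

theorem pvCov_cons (p : Int × List Int) (ts : List (Int × List Int)) (j : Int) :
    pvCov (p :: ts) j
    = (if PySem.List.pyGetD p.2 0 0 ≤ j ∧ j < PySem.List.pyGetD p.2 1 0
       then [p.1] else []) ++ pvCov ts j := by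
  simp only [pvCov, List.filter_cons]
  by_cases h : (PySem.List.pyGetD p.2 0 0 ≤ j ∧ j < PySem.List.pyGetD p.2 1 0)
  · simp [h]
  · simp [h]

theorem pvCell_nil : pvCell [] = [-1, -1] := rfl

-- A's cell update applied to a reduced cell is the reduction of the extended token list
theorem pvCellStep (ts : List Int) (ti : Int) (_hti : 0 ≤ ti) (hts : ∀ t ∈ ts, 0 ≤ t) :
    (PySem.List.pySetD
      (if PySem.List.pyGetD (pvCell ts) 0 0 = -1
       then PySem.List.pySetD (pvCell ts) 0 ti else pvCell ts) 1 (ti + 1))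
    = pvCell (ts ++ [ti]) := by
  cases ts with
  | nil =>
    simp [pvCell, PySem.List.pyGetD, PySem.List.pySetD, PySem.List.pySet?,
      PySem.List.pyIdx?, PySem.List.pyGet?_neg_one]
  | cons h t =>
    have hh : 0 ≤ h := hts h (by simp)
    have hne : ¬ ((h : Int) = -1) := by omega
    simp only [pvCell, List.cons_append, reduceCtorEq, if_false,
      PySem.List.pyGetD_zero_cons, hne, PySem.List.pySetD, PySem.List.pySet?,
      PySem.List.pyIdx?]
    rw [← List.cons_append, PySem.List.pyGetD_neg_one_append_singleton]
    simp

-- setting index s of a mapped range is mapping a pointwise-updated function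
theorem pvSetMapRange (f : Int → List Int) (c s : Int) (v : List Int)
    (h0 : 0 ≤ s) (_hc : s < c) :
    ((PySem.List.pyRange 0 c 1).map f).set s.toNat v
    = (PySem.List.pyRange 0 c 1).map (fun j => if j = s then v else f j) := by
  apply List.ext_getElem
  · simp
  · intro n h1 h2
    have hn : n < (c - 0).toNat := by
      simpa [PySem.List.length_pyRange_one] using h2
    rw [List.getElem_set]
    rw [List.getElem_map, List.getElem_map, PySem.List.getElem_pyRange_one]
    by_cases hns : n = s.toNat
    · have hb : ((n : Int)) = s := by omega
      subst hns
      simp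
      exact fun hs0 => absurd hs0 (by omega)
    · have ha : ¬ (s.toNat = n) := by omega
      have hb : ¬ ((n : Int) = s) := by omega
      simp [ha, hb]

-- one pvAStep on a reduced array updates exactly one cell
theorem pvAStep_map (g : Int → List Int) (c ti s : Int)
    (hti : 0 ≤ ti) (hg : ∀ j, ∀ t ∈ g j, 0 ≤ t)
    (h0 : 0 ≤ s) (hc : s < c) :
    pvAStep ((PySem.List.pyRange 0 c 1).map (fun j => pvCell (g j))) ti s
    = (PySem.List.pyRange 0 c 1).map
        (fun j => pvCell (if j = s then g j ++ [ti] else g j)) := by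
  simp only [pvAStep]
  rw [PySem.List.pyGetD_map_pyRange_of_nonneg _ _ _ _ h0 hc]
  rw [pvCellStep (g s) ti hti (hg s)]
  rw [PySem.List.pySetD_of_nonneg _ _ h0]
  rw [pvSetMapRange _ c s _ h0 hc]
  apply List.map_congr_left
  intro j _
  by_cases hj : j = s
  · subst hj; simp
  · simp [hj]

-- A's inner loop over range(s, s+n) on a reduced array, by induction on n
theorem pvInner (c ti : Int) (hti : 0 ≤ ti) :
    ∀ (n : Nat) (s : Int) (g : Int → List Int), 0 ≤ s → s + n ≤ c →
    (∀ j, ∀ t ∈ g j, 0 ≤ t) →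
    (PySem.List.pyRange s (s + n) 1).foldl (fun arr ci => pvAStep arr ti ci)
      ((PySem.List.pyRange 0 c 1).map (fun j => pvCell (g j)))
    = (PySem.List.pyRange 0 c 1).map
        (fun j => pvCell (g j ++ if s ≤ j ∧ j < s + n then [ti] else [])) := by
  intro n
  induction n with
  | zero =>
    intro s g h0 hsc hg
    rw [show s + ((0 : Nat) : Int) = s by push_cast; ring]
    rw [PySem.List.pyRange_one_eq_nil (le_refl s)]
    simp only [List.foldl_nil]
    apply List.map_congr_left
    intro j _
    have : ¬ (s ≤ j ∧ j < s) := by omega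
    simp [this]
  | succ n ih =>
    intro s g h0 hsc hg
    rw [PySem.List.pyRange_one_cons (a := s) (b := s + ((n + 1 : Nat) : Int))
      (by push_cast; omega)]
    simp only [List.foldl_cons]
    rw [pvAStep_map g c ti s hti hg h0 (by push_cast at hsc ⊢; omega)]
    have harg : (s + ((n + 1 : Nat) : Int)) = (s + 1) + (n : Int) := by push_cast; ring
    rw [harg]
    rw [ih (s + 1) (fun j => if j = s then g j ++ [ti] else g j) (by omega)
      (by push_cast at hsc ⊢; omega)
      (by
        intro j t ht
        by_cases hj : j = s
        · simp [hj] at ht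
          rcases ht with ht | ht
          · exact hg s t ht
          · omega
        · simp [hj] at ht
          exact hg j t ht)]
    apply List.map_congr_left
    intro j _
    congr 1
    by_cases hj : j = s
    · have h1 : ¬ (s + 1 ≤ j ∧ j < s + 1 + (n : Int)) := by omega
      have h2 : s ≤ j ∧ j < s + 1 + (n : Int) := by omega
      simp [hj]
      omega
    · have h3 : (s + 1 ≤ j ∧ j < s + 1 + (n : Int)) ↔ (s ≤ j ∧ j < s + 1 + (n : Int)) := by
        omega
      simp only [hj, if_false]
      rw [if_congr h3 rfl rfl]

-- A's outer loop: the whole fold reduces the accumulated covering lists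
theorem pvOuter (c : Int) :
    ∀ (ts : List (Int × List Int)) (g : Int → List Int),
    (∀ p ∈ ts, 0 ≤ p.1) →
    (∀ p ∈ ts, PySem.List.pyGetD p.2 0 0 < PySem.List.pyGetD p.2 1 0 →
       0 ≤ PySem.List.pyGetD p.2 0 0 ∧ PySem.List.pyGetD p.2 1 0 ≤ c) →
    (∀ j, ∀ t ∈ g j, 0 ≤ t) →
    ts.foldl
      (fun arr p =>
        (PySem.List.pyRange (PySem.List.pyGetD p.2 0 0) (PySem.List.pyGetD p.2 1 0) 1).foldl
          (fun arr2 ci => pvAStep arr2 p.1 ci) arr)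
      ((PySem.List.pyRange 0 c 1).map (fun j => pvCell (g j)))
    = (PySem.List.pyRange 0 c 1).map (fun j => pvCell (g j ++ pvCov ts j)) := by
  intro ts
  induction ts with
  | nil =>
    intro g _ _ _
    simp [pvCov]
  | cons p ts ih =>
    intro g hpos hspan hg
    simp only [List.foldl_cons]
    have hp1 : 0 ≤ p.1 := hpos p (by simp)
    by_cases hse : PySem.List.pyGetD p.2 0 0 < PySem.List.pyGetD p.2 1 0
    · obtain ⟨hs0, hec⟩ := hspan p (by simp) hse
      have he : PySem.List.pyGetD p.2 1 0
          = PySem.List.pyGetD p.2 0 0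
            + ((PySem.List.pyGetD p.2 1 0 - PySem.List.pyGetD p.2 0 0).toNat : Int) := by
        omega
      rw [he, pvInner c p.1 hp1
        ((PySem.List.pyGetD p.2 1 0 - PySem.List.pyGetD p.2 0 0).toNat)
        (PySem.List.pyGetD p.2 0 0) g hs0 (by omega) hg]
      rw [ih _ (fun p hp => hpos p (by simp [hp])) (fun p hp => hspan p (by simp [hp])) (by
        intro j t ht
        rw [List.mem_append] at ht
        rcases ht with ht | ht
        · exact hg j t ht
        · simp at ht
          rcases ht with ⟨-, rfl⟩
          exact hp1)]
      apply List.map_congr_left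
      intro j _
      rw [pvCov_cons, ← List.append_assoc]
      congr 2
      have hiff : (PySem.List.pyGetD p.2 0 0 ≤ j ∧
          j < PySem.List.pyGetD p.2 0 0
            + ((PySem.List.pyGetD p.2 1 0 - PySem.List.pyGetD p.2 0 0).toNat : Int))
          ↔ (PySem.List.pyGetD p.2 0 0 ≤ j ∧ j < PySem.List.pyGetD p.2 1 0) := by
        omega
      rw [if_congr hiff rfl rfl]
    · rw [PySem.List.pyRange_one_eq_nil (a := PySem.List.pyGetD p.2 0 0)
        (b := PySem.List.pyGetD p.2 1 0) (by omega)]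
      simp only [List.foldl_nil]
      rw [ih g (fun p hp => hpos p (by simp [hp])) (fun p hp => hspan p (by simp [hp])) hg]
      apply List.map_congr_left
      intro j _
      rw [pvCov_cons]
      have : ¬ (PySem.List.pyGetD p.2 0 0 ≤ j ∧ j < PySem.List.pyGetD p.2 1 0) := by omega
      simp [this]

-- B is the mapped reduction
theorem pvAlt_eq_map (l : List (List Int)) (c : Int) (h : pvLastNZ l = some c) :
    get_char2tok_span_py_alt l
    = (PySem.List.pyRange 0 c 1).map (fun j => pvCell (pvCovToks l j)) := by
  unfold get_char2tok_span_py_alt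
  rw [h]
  dsimp only
  rw [PySem.List.foldl_append_singleton_eq_map]
  simp

-- ===== VERDICT (by name: the statement is the Claim_ definition above) =====
theorem get_char2tok_span_py_spec : Claim_equal_get_char2tok_span_py := by
  intro l _hdom hpre
  obtain ⟨hlen, hsome, hbound⟩ := hpre
  obtain ⟨c, hc⟩ : ∃ c, pvLastNZ l = some c := by
    cases h : pvLastNZ l with
    | none => rw [h] at hsome; simp at hsome
    | some c => exact ⟨c, rfl⟩
  show get_char2tok_span_py l = get_char2tok_span_py_alt l
  rw [pvAlt_eq_map l c hc]
  unfold get_char2tok_span_py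
  rw [hc]
  dsimp only
  have hinit : (PySem.List.pyRange 0 c 1).map (fun _ => ([-1, -1] : List Int))
      = (PySem.List.pyRange 0 c 1).map (fun j => pvCell ((fun _ => ([] : List Int)) j)) := by
    apply List.map_congr_left
    intro j _
    simp [pvCell_nil]
  rw [hinit]
  rw [pvOuter c (PySem.List.enumerate l) (fun _ => [])
    (by
      intro p hp
      rw [PySem.List.mem_enumerate_iff] at hp
      obtain ⟨k, hk, rfl⟩ := hp
      simp)
    (by
      intro p hp
      rw [PySem.List.mem_enumerate_iff] at hp
      obtain ⟨k, hk, rfl⟩ := hp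
      intro hlt
      have hmem : l[k] ∈ l := List.getElem_mem hk
      have := hbound l[k] hmem hlt
      rw [hc] at this
      simpa using this)
    (by intro j t ht; simp at ht)]
  apply List.map_congr_left
  intro j _
  rw [pvCovToks_eq_pvCov]
  simp
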